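-- pv_equiv track=rewrite | github.com/AtLanTiJ/RegisterAndLogin | version00.py | ver_pw
-- ===== SOURCE A (Python) =====
-- def ver_pw(pw1,pw2):
--     if pw1 == pw2 and 6 <= len(pw1) <= 15:
--         for i in range(0,len(pw1)):
--             if '0' <= pw1[i] <= '9' or 'A' <= pw1[i] <= 'Z' or 'a' <= pw1[i] <= 'z':
--                 i += 1
--                 if i == len(pw1):
--                     return 0
--             else:
--                 return 1
--     else:
--         return 1
-- ===== SOURCE B (Python) =====
-- import re
--
-- _PW_RE = re.compile(r'[0-9A-Za-z]{6,15}')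
--
-- def ver_pw(pw1, pw2):
--     return 0 if pw1 == pw2 and _PW_RE.fullmatch(pw1) else 1
-- ===== Notes on version B (the rewrite author's own statement) =====
-- stated objective: idiomatic
-- what changed: Replaces the manual index loop with manual i increment by a single precompiled regex fullmatch [0-9A-Za-z]{6,15}, folding the length bound and the character class into one pattern.
import Mathlib
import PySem

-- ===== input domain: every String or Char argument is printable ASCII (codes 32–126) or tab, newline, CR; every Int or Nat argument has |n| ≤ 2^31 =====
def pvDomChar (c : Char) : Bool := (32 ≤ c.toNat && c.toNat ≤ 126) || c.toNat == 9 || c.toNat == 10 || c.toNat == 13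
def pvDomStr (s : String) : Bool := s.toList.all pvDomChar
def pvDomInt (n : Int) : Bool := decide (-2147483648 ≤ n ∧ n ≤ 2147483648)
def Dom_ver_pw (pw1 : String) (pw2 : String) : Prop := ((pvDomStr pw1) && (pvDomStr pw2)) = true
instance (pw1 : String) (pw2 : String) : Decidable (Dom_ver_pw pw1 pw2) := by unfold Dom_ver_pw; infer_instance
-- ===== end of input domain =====

-- B replaces A's index loop (with its manual `i += 1` early-return) by a single
-- regex-style full match of the class [0-9A-Za-z] with length bound 6..15 (idiomatic).

-- ===== PORT A =====
-- the `for i in range(0, len(pw1))` loop with early returns; `i += 1` then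
-- `if i == len(pw1): return 0` is the check `i+1 == len` before continuing.
def verPwLoop (cs : List Char) (i : Nat) : Int :=
  if h : i < cs.length then
    let c := cs[i]
    if ('0' ≤ c ∧ c ≤ '9') ∨ ('A' ≤ c ∧ c ≤ 'Z') ∨ ('a' ≤ c ∧ c ≤ 'z') then
      if i + 1 = cs.length then 0
      else verPwLoop cs (i + 1)
    else 1
  else 1  -- unreachable: the loop always returns before exhausting the range (length ≥ 6)
termination_by cs.length - i

def ver_pw (pw1 : String) (pw2 : String) : Int :=
  if pw1 == pw2 ∧ 6 ≤ pw1.toList.length ∧ pw1.toList.length ≤ 15 then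
    verPwLoop pw1.toList 0
  else 1

-- ===== PORT B =====
-- re.fullmatch(r'[0-9A-Za-z]{6,15}', pw1): every char in the class, length 6..15
def pwClass (c : Char) : Bool :=
  ('0' ≤ c && c ≤ '9') || ('A' ≤ c && c ≤ 'Z') || ('a' ≤ c && c ≤ 'z')

def pwFullmatch (s : String) : Bool :=
  s.toList.all pwClass && 6 ≤ s.toList.length && s.toList.length ≤ 15

def ver_pw_alt (pw1 : String) (pw2 : String) : Int :=
  if pw1 == pw2 && pwFullmatch pw1 then 0 else 1

-- ===== PRECONDITION & SPEC =====
def Spec_ver_pw (pw1 : String) (pw2 : String) (out : Int) : Prop := out = ver_pw_alt pw1 pw2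
instance (pw1 : String) (pw2 : String) (out : Int) : Decidable (Spec_ver_pw pw1 pw2 out) := by unfold Spec_ver_pw; infer_instance

-- ===== CLAIM (what is proved, stated in full; the proofs are below) =====
def Claim_equal_ver_pw : Prop := ∀ (pw1 : String) (pw2 : String), Dom_ver_pw pw1 pw2 → Spec_ver_pw pw1 pw2 (ver_pw pw1 pw2)

-- ===== LEMMAS AND PROOFS =====
theorem verPwLoop_all (cs : List Char) (i : Nat) (h : i < cs.length) :
    verPwLoop cs i = if (cs.drop i).all pwClass then 0 else 1 := by
  revert h
  induction i using verPwLoop.induct (cs := cs) with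
  | case1 i h' _c hcls h2 =>
    intro _
    rw [verPwLoop, dif_pos h', if_pos hcls, if_pos h2]
    have hsing : cs.drop i = [cs[i]] := by
      rw [List.drop_eq_getElem_cons h']
      congr 1
      simp only [List.drop_eq_nil_iff]
      omega
    have hc : pwClass cs[i] = true := by
      simp only [pwClass, Bool.or_eq_true, Bool.and_eq_true, decide_eq_true_eq]
      tauto
    rw [hsing, List.all_cons, List.all_nil, hc, Bool.and_true, if_pos rfl]
  | case2 i h' _c hcls h2 ih =>
    intro _
    rw [verPwLoop, dif_pos h', if_pos hcls, if_neg h2]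
    have hlt : i + 1 < cs.length := by omega
    have hc : pwClass cs[i] = true := by
      simp only [pwClass, Bool.or_eq_true, Bool.and_eq_true, decide_eq_true_eq]
      tauto
    rw [ih hlt, List.drop_eq_getElem_cons h', List.all_cons, hc, Bool.true_and]
  | case3 i h' _c hcls =>
    intro _
    rw [verPwLoop, dif_pos h', if_neg hcls]
    have hcf : pwClass cs[i] = false := by
      simp only [pwClass]
      by_contra hc
      simp only [Bool.not_eq_false, Bool.or_eq_true, Bool.and_eq_true, decide_eq_true_eq] at hc
      tauto
    rw [List.drop_eq_getElem_cons h', List.all_cons, hcf, Bool.false_and, if_neg (by simp)]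
  | case4 i h' =>
    intro h; omega

-- ===== VERDICT (by name: the statement is the Claim_ definition above) =====
theorem ver_pw_spec : Claim_equal_ver_pw := by
  intro pw1 pw2 _
  unfold Spec_ver_pw ver_pw ver_pw_alt pwFullmatch
  split_ifs with h1 h2 h2
  · -- both conditions hold: the loop returns 0
    obtain ⟨heq, h6, h15⟩ := h1
    simp only [Bool.and_eq_true, decide_eq_true_eq] at h2
    obtain ⟨-, ⟨hall, -⟩, -⟩ := h2
    have hpos : 0 < pw1.toList.length := by omega
    rw [verPwLoop_all _ _ hpos, List.drop_zero, if_pos hall]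
  · -- A's guard holds but the fullmatch fails: some char is out of class
    obtain ⟨heq, h6, h15⟩ := h1
    have hall : pw1.toList.all pwClass = false := by
      by_contra hc
      simp only [Bool.not_eq_false] at hc
      exact h2 (by
        simp only [Bool.and_eq_true, decide_eq_true_eq]
        exact ⟨heq, ⟨hc, h6⟩, h15⟩)
    have hpos : 0 < pw1.toList.length := by omega
    rw [verPwLoop_all _ _ hpos, List.drop_zero, hall, if_neg (by simp)]
  · -- the fullmatch holds but A's guard fails: impossible
    exfalso
    simp only [Bool.and_eq_true, decide_eq_true_eq] at h2
    obtain ⟨heq, ⟨-, h6⟩, h15⟩ := h2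
    exact h1 ⟨heq, h6, h15⟩
  · rfl
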